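-- pv_equiv track=rewrite | github.com/chrisyang922/CS | CASCS 131/Week6/code.py | are_parts_nonoverlapping
-- ===== SOURCE A (Python) =====
-- def are_parts_nonoverlapping(p):
--     count = -1
--     countTwo = -1
--     for x in p:
--         count += 1
--         countTwo = -1
--         for y in p:
--             countTwo += 1
--             for a in x:
--                 for b in y:
--                     if x!=y or countTwo != count:
--                         if a == b:
--                             return False
--     return True
-- ===== SOURCE B (Python) =====
-- def are_parts_nonoverlapping(p):
--     counts = {}
--     for part in p:
--         for e in set(part):
--             counts[e] = counts.get(e, 0) + 1
--     return all(c < 2 for c in counts.values())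
-- ===== Notes on version B (the rewrite author's own statement) =====
-- stated objective: faster
-- what changed: Replaces A's quadruply nested pairwise part-by-part element scan with a single pass that tallies, per element, how many parts contain it (deduping each part first), then checks that no tally reaches 2.
import Mathlib
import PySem

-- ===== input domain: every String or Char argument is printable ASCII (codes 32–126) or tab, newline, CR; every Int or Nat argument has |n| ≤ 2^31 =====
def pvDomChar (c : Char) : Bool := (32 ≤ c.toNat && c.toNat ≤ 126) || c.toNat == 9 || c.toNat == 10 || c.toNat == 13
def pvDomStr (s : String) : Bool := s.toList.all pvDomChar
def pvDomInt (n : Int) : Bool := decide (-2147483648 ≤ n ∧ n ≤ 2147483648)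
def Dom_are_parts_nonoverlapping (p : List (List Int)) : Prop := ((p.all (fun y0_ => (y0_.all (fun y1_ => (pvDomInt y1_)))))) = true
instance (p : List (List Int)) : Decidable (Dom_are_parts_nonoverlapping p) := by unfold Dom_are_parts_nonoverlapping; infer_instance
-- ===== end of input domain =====

-- B replaces A's quadruply nested pairwise scan by one tallying pass (per-element count of containing parts,
-- each part deduplicated) followed by a threshold check: asymptotically faster, same return value everywhere.

-- ===== PORT A =====
-- A's nested `for` loops with an early `return False` become nested short-circuiting `any`s, negated at the end;
-- `count`/`countTwo` (initialised to -1 and incremented at each loop head) are exactly the 0-based enumeration indices.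
def are_parts_nonoverlapping (p : List (List Int)) : Bool :=
  !((PySem.List.enumerate p).any (fun cx =>
      (PySem.List.enumerate p).any (fun cy =>
        cx.2.any (fun a => cy.2.any (fun b =>
          (decide (cx.2 ≠ cy.2) || decide (cy.1 ≠ cx.1)) && decide (a = b))))))

-- ===== PORT B =====
-- counts = {}; for part in p: for e in set(part): counts[e] = counts.get(e, 0) + 1; return all(c < 2 for c in counts.values())
-- (the `all` over the dict's values does not depend on the unmodelled Python set iteration order)
def are_parts_nonoverlapping_alt (p : List (List Int)) : Bool :=
  let counts : PySem.Dict Int Int :=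
    p.foldl (fun d part =>
      (PySem.Set.ofList part).foldl (fun d e => d.insert e (d.getD e 0 + 1)) d)
      PySem.Dict.empty
  counts.values.all (fun c => decide (c < 2))

-- ===== PRECONDITION & SPEC =====
def Spec_are_parts_nonoverlapping (p : List (List Int)) (out : Bool) : Prop := out = are_parts_nonoverlapping_alt p
instance (p : List (List Int)) (out : Bool) : Decidable (Spec_are_parts_nonoverlapping p out) := by unfold Spec_are_parts_nonoverlapping; infer_instance

-- ===== CLAIM (what is proved, stated in full; the proofs are below) =====
def Claim_equal_are_parts_nonoverlapping : Prop := ∀ (p : List (List Int)), Dom_are_parts_nonoverlapping p → Spec_are_parts_nonoverlapping p (are_parts_nonoverlapping p)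

-- ===== LEMMAS AND PROOFS =====

-- "some element occurs in two parts at distinct positions"
def pvOverlap (p : List (List Int)) : Prop :=
  ∃ (e : Int) (i j : Nat), ∃ (_ : i < p.length) (_ : j < p.length), i ≠ j ∧ e ∈ p[i] ∧ e ∈ p[j]

-- the tally B builds
def pvCounts (p : List (List Int)) : PySem.Dict Int Int :=
  p.foldl (fun d part =>
    (PySem.Set.ofList part).foldl (fun d e => d.insert e (d.getD e 0 + 1)) d)
    PySem.Dict.empty

lemma pvAlt_eq (p : List (List Int)) :
    are_parts_nonoverlapping_alt p = (pvCounts p).values.all (fun c => decide (c < 2)) := rfl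

lemma count_ofList (e : Int) (part : List Int) :
    List.count e (PySem.Set.ofList part) = if e ∈ part then 1 else 0 := by
  rcases Decidable.em (e ∈ part) with h | h
  · simp [h]
  · simp [h, List.count_eq_zero.2 (fun hc => h ((PySem.Set.mem_ofList part e).1 hc))]

lemma getD_counts_gen (p : List (List Int)) (d : PySem.Dict Int Int) (e : Int) :
    (p.foldl (fun d part =>
      (PySem.Set.ofList part).foldl (fun d e => d.insert e (d.getD e 0 + 1)) d) d).getD e 0
    = d.getD e 0 + (p.countP (fun part => decide (e ∈ part)) : Int) := by
  induction p generalizing d with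
  | nil => simp
  | cons part rest ih =>
    simp only [List.foldl_cons, ih, PySem.Dict.getD_foldl_insert_add_one, count_ofList,
      List.countP_cons]
    by_cases h : e ∈ part
    · simp [h]
      ring
    · simp [h]

lemma mem_keys_counts_gen (p : List (List Int)) (d : PySem.Dict Int Int) (e : Int) :
    e ∈ (p.foldl (fun d part =>
      (PySem.Set.ofList part).foldl (fun d e => d.insert e (d.getD e 0 + 1)) d) d).keys
    ↔ e ∈ d.keys ∨ ∃ part ∈ p, e ∈ part := by
  induction p generalizing d with
  | nil => simp
  | cons part rest ih =>
    simp only [List.foldl_cons, ih, PySem.Dict.keys_foldl_insert, PySem.Set.mem_update,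
      PySem.Set.mem_ofList, List.mem_cons]
    constructor
    · rintro (⟨h | h⟩ | ⟨q, hq, he⟩)
      · exact Or.inl h
      · exact Or.inr ⟨part, Or.inl rfl, h⟩
      · exact Or.inr ⟨q, Or.inr hq, he⟩
    · rintro (h | ⟨q, hq | hq, he⟩)
      · exact Or.inl (Or.inl h)
      · exact Or.inl (Or.inr (hq ▸ he))
      · exact Or.inr ⟨q, hq, he⟩

lemma getD_counts (p : List (List Int)) (e : Int) :
    (pvCounts p).getD e 0 = (p.countP (fun part => decide (e ∈ part)) : Int) := by
  unfold pvCounts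
  rw [getD_counts_gen]
  simp

lemma mem_keys_counts (p : List (List Int)) (e : Int) :
    e ∈ (pvCounts p).keys ↔ ∃ part ∈ p, e ∈ part := by
  unfold pvCounts
  rw [mem_keys_counts_gen]
  simp

lemma nodup_keys_counts (p : List (List Int)) : (pvCounts p).keys.Nodup := by
  unfold pvCounts
  generalize hd : (PySem.Dict.empty : PySem.Dict Int Int) = d
  have hnd : d.keys.Nodup := by rw [← hd]; exact PySem.Dict.nodup_keys_empty
  clear hd
  induction p generalizing d with
  | nil => exact hnd
  | cons part rest ih =>
    exact ih _ (PySem.Dict.nodup_keys_foldl_insert _ _ _ hnd)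

lemma alt_eq_true_iff (p : List (List Int)) :
    are_parts_nonoverlapping_alt p = true
    ↔ ∀ e : Int, p.countP (fun part => decide (e ∈ part)) ≤ 1 := by
  rw [pvAlt_eq, PySem.Dict.values_eq_map_keys _ (nodup_keys_counts p) 0, List.all_eq_true]
  constructor
  · intro h e
    by_cases hm : ∃ part ∈ p, e ∈ part
    · have hk : e ∈ (pvCounts p).keys := (mem_keys_counts p e).2 hm
      have := h _ (List.mem_map_of_mem hk)
      simp only [decide_eq_true_eq, getD_counts] at this
      omega
    · have : p.countP (fun part => decide (e ∈ part)) = 0 := by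
        rw [List.countP_eq_zero]
        intro part hp
        simp only [decide_eq_true_eq]
        exact fun he => hm ⟨part, hp, he⟩
      omega
  · intro h c hc
    rcases List.mem_map.1 hc with ⟨e, _, rfl⟩
    have := h e
    simp only [decide_eq_true_eq, getD_counts]
    omega

lemma a_eq_false_iff (p : List (List Int)) :
    are_parts_nonoverlapping p = false ↔ pvOverlap p := by
  unfold are_parts_nonoverlapping pvOverlap
  rw [Bool.not_eq_false']
  simp only [List.any_eq_true, PySem.List.mem_enumerate_iff, zero_add]
  constructor
  · rintro ⟨cx, ⟨i, hi, rfl⟩, cy, ⟨j, hj, rfl⟩, a, ha, b, hb, hcond⟩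
    simp only [Bool.and_eq_true, Bool.or_eq_true, decide_eq_true_eq] at hcond
    obtain ⟨hne, rfl⟩ := hcond
    refine ⟨a, i, j, hi, hj, ?_, ha, hb⟩
    rcases hne with h | h
    · intro rfl; exact h rfl
    · intro rfl; exact h rfl
  · rintro ⟨e, i, j, hi, hj, hij, hei, hej⟩
    refine ⟨_, ⟨i, hi, rfl⟩, _, ⟨j, hj, rfl⟩, e, hei, e, hej, ?_⟩
    have hji : (j : Int) ≠ (i : Int) := by exact_mod_cast hij.symm
    simp [hji]

lemma two_le_countP {α : Type} (q : α → Bool) (l : List α) (i j : Nat)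
    (hi : i < l.length) (hj : j < l.length) (hij : i ≠ j)
    (h1 : q l[i] = true) (h2 : q l[j] = true) : 2 ≤ l.countP q := by
  induction l generalizing i j with
  | nil => simp at hi
  | cons x t ih =>
    simp only [List.length_cons] at hi hj
    match i, j with
    | 0, 0 => exact absurd rfl hij
    | 0, j+1 =>
      simp only [List.getElem_cons_zero, List.getElem_cons_succ] at h1 h2
      rw [List.countP_cons_of_pos h1]
      have : 0 < t.countP q :=
        List.countP_pos_iff.2 ⟨t[j], List.getElem_mem _, h2⟩
      omega
    | i+1, 0 =>
      simp only [List.getElem_cons_zero, List.getElem_cons_succ] at h1 h2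
      rw [List.countP_cons_of_pos h2]
      have : 0 < t.countP q :=
        List.countP_pos_iff.2 ⟨t[i], List.getElem_mem _, h1⟩
      omega
    | i+1, j+1 =>
      simp only [List.getElem_cons_succ] at h1 h2
      have := ih i j (by omega) (by omega) (by omega) h1 h2
      rw [List.countP_cons]
      omega

lemma exists_pair_of_two_le_countP {α : Type} (q : α → Bool) (l : List α)
    (h : 2 ≤ l.countP q) :
    ∃ (i j : Nat), ∃ (_ : i < l.length) (_ : j < l.length),
      i ≠ j ∧ q l[i] = true ∧ q l[j] = true := by
  induction l with
  | nil => simp at h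
  | cons x t ih =>
    by_cases hx : q x = true
    · rw [List.countP_cons_of_pos hx] at h
      have : 0 < t.countP q := by omega
      rcases List.countP_pos_iff.1 this with ⟨a, ha, hqa⟩
      rcases List.getElem_of_mem ha with ⟨k, hk, rfl⟩
      exact ⟨0, k+1, by simp, by simpa using Nat.succ_lt_succ hk, by omega, by simpa using hx,
        by simpa using hqa⟩
    · rw [List.countP_cons_of_neg (by simpa using hx)] at h
      rcases ih h with ⟨i, j, hi, hj, hij, h1, h2⟩
      exact ⟨i+1, j+1, Nat.succ_lt_succ hi, Nat.succ_lt_succ hj, by omega,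
        by simpa using h1, by simpa using h2⟩

lemma overlap_iff (p : List (List Int)) :
    pvOverlap p ↔ ∃ e : Int, 2 ≤ p.countP (fun part => decide (e ∈ part)) := by
  constructor
  · rintro ⟨e, i, j, hi, hj, hij, hei, hej⟩
    exact ⟨e, two_le_countP _ p i j hi hj hij (by simpa using hei) (by simpa using hej)⟩
  · rintro ⟨e, h⟩
    rcases exists_pair_of_two_le_countP _ p h with ⟨i, j, hi, hj, hij, h1, h2⟩
    exact ⟨e, i, j, hi, hj, hij, by simpa using h1, by simpa using h2⟩

-- ===== VERDICT (by name: the statement is the Claim_ definition above) =====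
theorem are_parts_nonoverlapping_spec : Claim_equal_are_parts_nonoverlapping := by
  intro p _
  show are_parts_nonoverlapping p = are_parts_nonoverlapping_alt p
  rcases hA : are_parts_nonoverlapping p with _ | _
  · have hov := (a_eq_false_iff p).1 hA
    rcases (overlap_iff p).1 hov with ⟨e, he⟩
    rcases hB : are_parts_nonoverlapping_alt p with _ | _
    · rfl
    · have := (alt_eq_true_iff p).1 hB e
      omega
  · have hnov : ¬ pvOverlap p := fun hov => by
      have := (a_eq_false_iff p).2 hov
      rw [hA] at this; exact Bool.noConfusion this
    have : ∀ e : Int, p.countP (fun part => decide (e ∈ part)) ≤ 1 := by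
      intro e
      by_contra hc
      exact hnov ((overlap_iff p).2 ⟨e, by omega⟩)
    exact ((alt_eq_true_iff p).2 this).symm
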